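-- pv_equiv track=rewrite | github.com/alphantulukcu/Bilkent-University-CS115 | LAB03/Lab03_AlphanTulukcu_Q1.py | is_neat_reversible
-- ===== SOURCE A (Python) =====
-- def is_neat_reversible(s):
--
--     len1 = len(s)
--
--     s_new = ""
--     i1 = 1
--     for i in s:
--         s_new = s_new + s[i1%(len1)]
--         i1 += 1
--
--     s_new_reverse = ""
--     i2 = -1
--     for i in s_new:
--         s_new_reverse = s_new_reverse + s_new[i2]
--         i2 -= 1
--     return s_new_reverse == s
-- ===== SOURCE B (Python) =====
-- def is_neat_reversible(s):
--     n = len(s)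
--     for i in range(1, n):
--         if s[i] != s[n - i]:
--             return False
--     return True
-- ===== Notes on version B (the rewrite author's own statement) =====
-- stated objective: simpler
-- what changed: Instead of building the left-rotated string and then its reverse and comparing whole strings, B scans indices 1..n-1 once, checking s[i] == s[n-i] directly with early exit and no intermediate strings.
import Mathlib
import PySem

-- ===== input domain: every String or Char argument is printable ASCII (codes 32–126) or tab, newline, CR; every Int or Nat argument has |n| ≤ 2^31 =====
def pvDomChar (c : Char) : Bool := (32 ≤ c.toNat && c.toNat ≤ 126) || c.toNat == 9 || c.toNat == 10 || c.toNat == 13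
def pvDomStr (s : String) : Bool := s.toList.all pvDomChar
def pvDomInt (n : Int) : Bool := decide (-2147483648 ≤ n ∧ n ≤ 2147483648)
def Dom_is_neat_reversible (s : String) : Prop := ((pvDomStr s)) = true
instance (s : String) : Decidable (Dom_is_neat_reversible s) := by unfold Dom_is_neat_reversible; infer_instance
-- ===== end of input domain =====

-- B replaces A's rotate-then-reverse string building by a direct index scan s[i] == s[n-i]; simpler and no intermediate strings.

-- ===== PORT A =====
-- Literal port of A. Every index A computes is in range whenever a loop body runs
-- (the loops iterate over a nonempty string), so pyGetD's default ' ' is never used.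
def is_neat_reversible (s : String) : Bool :=
  let l := s.toList
  let len1 : Int := (l.length : Int)
  let st1 := l.foldl (fun (p : List Char × Int) (_ : Char) =>
      (p.1 ++ [PySem.List.pyGetD l (PySem.Int.mod p.2 len1) ' '], p.2 + 1)) ([], 1)
  let s_new := st1.1
  let st2 := s_new.foldl (fun (p : List Char × Int) (_ : Char) =>
      (p.1 ++ [PySem.List.pyGetD s_new p.2 ' '], p.2 - 1)) ([], -1)
  let s_new_reverse := st2.1
  s_new_reverse == l

-- ===== PORT B =====
def is_neat_reversible_alt (s : String) : Bool :=
  let l := s.toList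
  let n := l.length
  (List.range' 1 (n - 1)).all (fun i => l.getD i ' ' == l.getD (n - i) ' ')

-- ===== PRECONDITION & SPEC =====
def Spec_is_neat_reversible (s : String) (out : Bool) : Prop := out = is_neat_reversible_alt s
instance (s : String) (out : Bool) : Decidable (Spec_is_neat_reversible s out) := by unfold Spec_is_neat_reversible; infer_instance

-- ===== CLAIM (what is proved, stated in full; the proofs are below) =====
def Claim_equal_is_neat_reversible : Prop := ∀ (s : String), Dom_is_neat_reversible s → Spec_is_neat_reversible s (is_neat_reversible s)

-- ===== LEMMAS AND PROOFS =====

-- A's first loop: append g of an incrementing counter, once per element.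
theorem pv_foldl_inc (g : Int → Char) (xs : List Char) (acc : List Char) (i : Int) :
    List.foldl (fun (p : List Char × Int) (_ : Char) => (p.1 ++ [g p.2], p.2 + 1)) (acc, i) xs
      = (acc ++ (List.range xs.length).map (fun k : Nat => g (i + (k : Int))), i + xs.length) := by
  induction xs generalizing acc i with
  | nil => simp
  | cons x xs ih =>
      rw [List.foldl_cons, ih]
      have hr : (List.range (xs.length + 1)).map (fun k : Nat => g (i + (k : Int)))
          = g i :: (List.range xs.length).map (fun k : Nat => g ((i + 1) + (k : Int))) := by
        rw [List.range_succ_eq_map, List.map_cons, List.map_map]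
        congr 1
        · norm_num
        · exact List.map_congr_left (fun k _ => by
            simp only [Function.comp_apply]
            congr 1
            push_cast
            ring)
      refine Prod.ext ?_ (by simp only [List.length_cons]; push_cast; ring)
      simp only [List.length_cons, hr]
      simp

-- A's second loop: append g of a decrementing counter, once per element.
theorem pv_foldl_dec (g : Int → Char) (xs : List Char) (acc : List Char) (i : Int) :
    List.foldl (fun (p : List Char × Int) (_ : Char) => (p.1 ++ [g p.2], p.2 - 1)) (acc, i) xs
      = (acc ++ (List.range xs.length).map (fun k : Nat => g (i - (k : Int))), i - xs.length) := by
  induction xs generalizing acc i with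
  | nil => simp
  | cons x xs ih =>
      rw [List.foldl_cons, ih]
      have hr : (List.range (xs.length + 1)).map (fun k : Nat => g (i - (k : Int)))
          = g i :: (List.range xs.length).map (fun k : Nat => g ((i - 1) - (k : Int))) := by
        rw [List.range_succ_eq_map, List.map_cons, List.map_map]
        congr 1
        · norm_num
        · exact List.map_congr_left (fun k _ => by
            simp only [Function.comp_apply]
            congr 1
            push_cast
            ring)
      refine Prod.ext ?_ (by simp only [List.length_cons]; push_cast; ring)
      simp only [List.length_cons, hr]
      simp

-- Python's negative indexing: xs[-(1+k)] = xs[len-1-k] for k < len.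
theorem pv_pyGetD_neg (xs : List Char) (k : Nat) (hk : k < xs.length) (d : Char) :
    PySem.List.pyGetD xs (-1 - (k : Int)) d = xs.getD (xs.length - 1 - k) d := by
  simp only [PySem.List.pyGetD, PySem.List.pyGet?, PySem.List.pyIdx?]
  have h1 : ¬ (0 ≤ (-1 - (k : Int))) := by omega
  have h2 : -((xs.length : Int)) ≤ -1 - (k : Int) := by omega
  simp only [h1, if_false, h2, if_true]
  have h3 : (-(-1 - (k : Int))).toNat = k + 1 := by omega
  rw [h3]
  have hlt : xs.length - (k + 1) < xs.length := by omega
  show (xs[xs.length - (k + 1)]?).getD d = xs.getD (xs.length - 1 - k) d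
  rw [List.getElem?_eq_getElem hlt,
    List.getD_eq_getElem _ _ (show xs.length - 1 - k < xs.length by omega)]
  simp only [Option.getD_some]
  congr 1
  omega

-- A list of l.length values equals l iff it agrees with l at every index.
theorem pv_map_range_eq_iff (f : Nat → Char) (l : List Char) :
    (List.map f (List.range l.length) = l) ↔ ∀ k (_ : k < l.length), f k = l[k] := by
  constructor
  · intro h k hk
    have h2 : l[k] = (List.map f (List.range l.length))[k]'(by simpa using hk) :=
      List.getElem_of_eq h.symm hk
    simpa using h2.symm
  · intro h
    apply List.ext_getElem (by simp)
    intro k hk1 hk2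
    simpa using h k hk2

-- One element of A's reversed rotated list, expressed directly over l.
theorem pv_rev_elem (l : List Char) (k : Nat) (hk : k < l.length) :
    PySem.List.pyGetD ((List.range l.length).map
        (fun j : Nat => PySem.List.pyGetD l (PySem.Int.mod (1 + (j : Int)) (l.length : Int)) ' ')) (-1 - (k : Int)) ' '
      = l.getD ((l.length - k) % l.length) ' ' := by
  rw [pv_pyGetD_neg _ k (by simpa using hk) ' ']
  have hlt : l.length - 1 - k < l.length := by omega
  rw [List.getD_eq_getElem _ _ (by simp only [List.length_map, List.length_range]; omega)]
  simp only [List.length_map, List.length_range, List.getElem_map, List.getElem_range]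
  have hcast : (1 : Int) + ((l.length - 1 - k : Nat) : Int) = ((l.length - k : Nat) : Int) := by omega
  rw [hcast, PySem.Int.mod_natCast, PySem.List.pyGetD_natCast]

-- The comparison A performs, rewritten as B's index scan.
theorem pv_core (l : List Char) :
    (((List.range l.length).map (fun k : Nat => l.getD ((l.length - k) % l.length) ' ')) == l)
      = (List.range' 1 (l.length - 1)).all (fun i => l.getD i ' ' == l.getD (l.length - i) ' ') := by
  rw [Bool.eq_iff_iff]
  simp only [beq_iff_eq, List.all_eq_true, List.mem_range'_1]
  rw [pv_map_range_eq_iff]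
  constructor
  · intro h i hi
    obtain ⟨h1, h2⟩ := hi
    have hi' : i < l.length := by omega
    have hk : l.length - i < l.length := by omega
    have := h (l.length - i) hk
    have hmod : (l.length - (l.length - i)) % l.length = i := by
      have he : l.length - (l.length - i) = i := by omega
      rw [he, Nat.mod_eq_of_lt hi']
    rw [hmod, List.getD_eq_getElem _ _ hi'] at this
    rw [List.getD_eq_getElem _ _ hi', List.getD_eq_getElem _ _ hk]
    rw [this]
  · intro h k hk
    rcases Nat.eq_zero_or_pos k with hk0 | hk0
    · subst hk0
      simp only [Nat.sub_zero, Nat.mod_self]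
      rw [List.getD_eq_getElem _ _ (by omega)]
    · have := h k ⟨hk0, by omega⟩
      have hmod : (l.length - k) % l.length = l.length - k := Nat.mod_eq_of_lt (by omega)
      rw [hmod, ← this, List.getD_eq_getElem _ _ hk]

theorem pv_main (s : String) : is_neat_reversible s = is_neat_reversible_alt s := by
  simp only [is_neat_reversible, is_neat_reversible_alt]
  generalize s.toList = l
  rw [pv_foldl_inc (fun j => PySem.List.pyGetD l (PySem.Int.mod j (l.length : Int)) ' ') l [] 1]
  simp only [List.nil_append]
  rw [pv_foldl_dec (fun j => PySem.List.pyGetD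
      ((List.range l.length).map (fun k : Nat => PySem.List.pyGetD l (PySem.Int.mod (1 + (k : Int)) (l.length : Int)) ' ')) j ' ')]
  simp only [List.nil_append, List.length_map, List.length_range]
  have hmap : (List.range l.length).map
      (fun k : Nat => PySem.List.pyGetD ((List.range l.length).map
        (fun j : Nat => PySem.List.pyGetD l (PySem.Int.mod (1 + (j : Int)) (l.length : Int)) ' ')) (-1 - (k : Int)) ' ')
      = (List.range l.length).map (fun k : Nat => l.getD ((l.length - k) % l.length) ' ') :=
    List.map_congr_left (fun k hk => pv_rev_elem l k (List.mem_range.mp hk))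
  rw [hmap]
  exact pv_core l

-- ===== VERDICT (by name: the statement is the Claim_ definition above) =====
theorem is_neat_reversible_spec : Claim_equal_is_neat_reversible := by
  intro s _
  exact pv_main s
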